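-- pv_equiv track=rewrite | github.com/gselzer/cs769-final-project | utils.py | _trim_phrase_translation_table
-- ===== SOURCE A (Python) =====
-- from string import punctuation
--
-- def _trim_phrase_translation_table(phrase_table):
--     def phrase_length(phrase):
--         return phrase[0][1] - phrase[0][0], phrase[1][1] - phrase[1][0]
--
--     sorted_phrases = sorted(phrase_table, key=phrase_length)
--
--     filtered_phrases = []
--     for phrase in sorted_phrases:
--         src_length, tgt_length = phrase_length(phrase)
--
--         if src_length <= 3 and tgt_length <= 3:
--             overlap = False
--             for kept_phrase in filtered_phrases:
--                 if (phrase[0][0] < kept_phrase[0][1] and phrase[0][1] > kept_phrase[0][0]) or \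
--                    (phrase[1][0] < kept_phrase[1][1] and phrase[1][1] > kept_phrase[1][0]):
--                     overlap = True
--                     break
--             if not overlap:
--                 filtered_phrases.append(phrase)
--     filtered_phrase_table = {entry for entry in filtered_phrases if not \
--             any(char in punctuation for char in entry[2]) and not any(char in punctuation for char in entry[3])}
--     return set(filtered_phrase_table)
-- ===== SOURCE B (Python) =====
-- from string import punctuation
--
-- def _trim_phrase_translation_table(phrase_table):
--     # Hash-indexed greedy: kept spans all have length <= 3, so a candidate
--     # span (s0, s1) can only overlap a kept span whose start lies in
--     # [s0-2, s1); a dict start -> max kept end answers the overlap query in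
--     # O(1), removing A's inner scan over all kept phrases.
--     punct = set(punctuation)
--     src_end = {}
--     tgt_end = {}
--     result = set()
--     for phrase in sorted(phrase_table,
--                          key=lambda p: (p[0][1] - p[0][0], p[1][1] - p[1][0])):
--         (s0, s1), (t0, t1) = phrase[0], phrase[1]
--         if s1 - s0 > 3 or t1 - t0 > 3:
--             continue
--         if any(src_end.get(a, s0) > s0 for a in range(s0 - 2, s1)):
--             continue
--         if any(tgt_end.get(a, t0) > t0 for a in range(t0 - 2, t1)):
--             continue
--         src_end[s0] = max(src_end.get(s0, s1), s1)
--         tgt_end[t0] = max(tgt_end.get(t0, t1), t1)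
--         if punct.isdisjoint(phrase[2]) and punct.isdisjoint(phrase[3]):
--             result.add(phrase)
--     return result
-- ===== Notes on version B (the rewrite author's own statement) =====
-- stated objective: faster
-- what changed: Replaces A's inner scan over all kept phrases by two hash indexes (dict start -> max kept end for source and target spans): since every kept span has length <= 3, a candidate span (s0,s1) can only overlap a kept span whose start lies in the <=5-element window [s0-2, s1), so each overlap test becomes O(1) dict lookups instead of a pass over the kept list.
import Mathlib
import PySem

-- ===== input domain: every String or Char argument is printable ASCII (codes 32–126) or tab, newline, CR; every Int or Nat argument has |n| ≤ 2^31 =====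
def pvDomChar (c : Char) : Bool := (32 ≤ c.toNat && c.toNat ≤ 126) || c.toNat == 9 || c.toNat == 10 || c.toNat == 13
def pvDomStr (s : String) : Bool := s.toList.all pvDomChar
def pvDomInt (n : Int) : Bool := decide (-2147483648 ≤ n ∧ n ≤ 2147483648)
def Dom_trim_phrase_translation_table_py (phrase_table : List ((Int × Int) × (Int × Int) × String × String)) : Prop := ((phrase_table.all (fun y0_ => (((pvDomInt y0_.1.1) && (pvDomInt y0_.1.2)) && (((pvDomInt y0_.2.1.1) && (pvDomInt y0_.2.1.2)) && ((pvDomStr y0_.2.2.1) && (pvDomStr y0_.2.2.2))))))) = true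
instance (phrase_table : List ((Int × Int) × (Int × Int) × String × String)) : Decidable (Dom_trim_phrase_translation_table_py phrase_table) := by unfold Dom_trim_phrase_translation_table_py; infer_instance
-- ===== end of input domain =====

-- B replaces A's inner scan over all kept phrases by two hash indexes (dict: span start → max
-- kept end); since kept spans have length ≤ 3, each overlap test reads a ≤ 5-wide start window.

abbrev PvPhrase := (Int × Int) × (Int × Int) × String × String

-- ===== PORT A =====
-- string.punctuation (module-level constant both programs import)
def pvPunct : List Char := "!\"#$%&'()*+,-./:;<=>?@[\\]^_`{|}~".toList

-- A's loop body: greedy keep with the combined src-or-tgt overlap scan over whole kept phrases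
def pvStepA (acc : List PvPhrase) (p : PvPhrase) : List PvPhrase :=
  if p.1.2 - p.1.1 ≤ 3 ∧ p.2.1.2 - p.2.1.1 ≤ 3 then
    let overlap := acc.any (fun k =>
      decide (p.1.1 < k.1.2 ∧ p.1.2 > k.1.1) || decide (p.2.1.1 < k.2.1.2 ∧ p.2.1.2 > k.2.1.1))
    if overlap then acc else acc ++ [p]
  else acc

-- A's set-comprehension predicate; 'char in punctuation' on a 1-char string is exactly membership in pvPunct
def pvCleanA (e : PvPhrase) : Bool :=
  !(e.2.2.1.toList.any (fun c => pvPunct.contains c)) &&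
  !(e.2.2.2.toList.any (fun c => pvPunct.contains c))

def trim_phrase_translation_table_py (phrase_table : List ((Int × Int) × (Int × Int) × String × String)) : List ((Int × Int) × (Int × Int) × String × String) :=
  let sorted_phrases := PySem.List.sorted2 phrase_table
    (fun p => p.1.2 - p.1.1) (fun p => p.2.1.2 - p.2.1.1)
  let filtered_phrases := sorted_phrases.foldl pvStepA []
  let filtered_phrase_table := PySem.Set.ofList (filtered_phrases.filter pvCleanA)
  PySem.Set.ofList filtered_phrase_table

-- ===== PORT B =====
def pvPunctSet : PySem.Set Char := PySem.Set.ofList pvPunct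

-- B's windowed overlap test: any(d.get(a, s0) > s0 for a in range(s0-2, s1))
def pvWin (d : PySem.Dict Int Int) (s0 s1 : Int) : Bool :=
  (PySem.List.pyRange (s0 - 2) s1 1).any (fun a => decide ((d.getD a s0) > s0))

-- B's loop body: two dicts (span start → max kept end) + immediate clean-output set
def pvStepB (st : PySem.Dict Int Int × PySem.Dict Int Int × PySem.Set PvPhrase) (p : PvPhrase) :
    PySem.Dict Int Int × PySem.Dict Int Int × PySem.Set PvPhrase :=
  if p.1.2 - p.1.1 > 3 ∨ p.2.1.2 - p.2.1.1 > 3 then st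
  else if pvWin st.1 p.1.1 p.1.2 then st
  else if pvWin st.2.1 p.2.1.1 p.2.1.2 then st
  else (st.1.insert p.1.1 (max (st.1.getD p.1.1 p.1.2) p.1.2),
        st.2.1.insert p.2.1.1 (max (st.2.1.getD p.2.1.1 p.2.1.2) p.2.1.2),
        if PySem.Set.isdisjoint pvPunctSet p.2.2.1.toList &&
           PySem.Set.isdisjoint pvPunctSet p.2.2.2.toList
        then PySem.Set.add st.2.2 p else st.2.2)

def trim_phrase_translation_table_py_alt (phrase_table : List ((Int × Int) × (Int × Int) × String × String)) : List ((Int × Int) × (Int × Int) × String × String) :=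
  let ordered := PySem.List.sorted2 phrase_table
    (fun p => p.1.2 - p.1.1) (fun p => p.2.1.2 - p.2.1.1)
  (ordered.foldl pvStepB (PySem.Dict.empty, PySem.Dict.empty, PySem.Set.empty)).2.2

-- ===== PRECONDITION & SPEC =====
def Spec_trim_phrase_translation_table_py (phrase_table : List ((Int × Int) × (Int × Int) × String × String)) (out : List ((Int × Int) × (Int × Int) × String × String)) : Prop := out = trim_phrase_translation_table_py_alt phrase_table
instance (phrase_table : List ((Int × Int) × (Int × Int) × String × String)) (out : List ((Int × Int) × (Int × Int) × String × String)) : Decidable (Spec_trim_phrase_translation_table_py phrase_table out) := by unfold Spec_trim_phrase_translation_table_py; infer_instance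

-- ===== CLAIM (what is proved, stated in full; the proofs are below) =====
def Claim_equal_trim_phrase_translation_table_py : Prop := ∀ (phrase_table : List ((Int × Int) × (Int × Int) × String × String)), Dom_trim_phrase_translation_table_py phrase_table → Spec_trim_phrase_translation_table_py phrase_table (trim_phrase_translation_table_py phrase_table)

-- ===== LEMMAS AND PROOFS =====

-- the dict start → max-kept-end invariant: d looks up exactly the achieved maximum end
-- among kept intervals with that start
def PvInv (K : List (Int × Int)) (d : PySem.Dict Int Int) : Prop :=
  (∀ a m, d.get? a = some m → ((a, m) ∈ K ∧ ∀ b, (a, b) ∈ K → b ≤ m)) ∧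
  (∀ a b, (a, b) ∈ K → ∃ m, d.get? a = some m)

lemma pvInv_empty : PvInv [] PySem.Dict.empty := by
  constructor
  · intro a m h; simp [PySem.Dict.get?_empty] at h
  · intro a b h; simp at h

-- B's clean test (set.isdisjoint) decides the same condition as A's "no char in punctuation"
lemma pv_isdisjoint_eq (t : List Char) :
    PySem.Set.isdisjoint pvPunctSet t = !(t.any (fun c => pvPunct.contains c)) := by
  apply Bool.coe_iff_coe.mp
  simp only [PySem.Set.isdisjoint_iff, pvPunctSet, PySem.Set.mem_ofList,
    Bool.not_eq_eq_eq_not, Bool.not_true, List.any_eq_false, List.contains_eq_mem,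
    decide_eq_true_eq]
  constructor
  · intro h c hc hp; exact h c hp hc
  · intro h c hp hc; exact h c hc hp

-- the window test equals the linear overlap scan, given the invariant and length ≤ 3 of kept spans
lemma pvWin_eq (K : List (Int × Int)) (d : PySem.Dict Int Int)
    (hinv : PvInv K d) (hlen : ∀ ab ∈ K, ab.2 - ab.1 ≤ 3) (s0 s1 : Int) :
    pvWin d s0 s1 = K.any (fun ab => decide (s0 < ab.2 ∧ s1 > ab.1)) := by
  apply Bool.coe_iff_coe.mp
  unfold pvWin
  simp only [List.any_eq_true, PySem.List.mem_pyRange_one, decide_eq_true_eq]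
  constructor
  · rintro ⟨a, ⟨ha1, ha2⟩, hgt⟩
    rcases h : d.get? a with _ | m
    · rw [PySem.Dict.getD_of_get?_eq_none _ _ h] at hgt; omega
    · rw [PySem.Dict.getD_of_get?_eq_some _ _ h] at hgt
      obtain ⟨hmem, _⟩ := hinv.1 a m h
      exact ⟨(a, m), hmem, hgt, ha2⟩
  · rintro ⟨⟨a, b⟩, hmem, hov1, hov2⟩
    obtain ⟨m, hm⟩ := hinv.2 a b hmem
    obtain ⟨hmmem, hmax⟩ := hinv.1 a m hm
    have hb : b ≤ m := hmax b hmem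
    have hl : m - a ≤ 3 := hlen (a, m) hmmem
    refine ⟨a, ⟨by omega, hov2⟩, ?_⟩
    rw [PySem.Dict.getD_of_get?_eq_some _ _ hm]; omega

-- updating the dict with a new interval preserves the invariant
lemma pvInv_step (K : List (Int × Int)) (d : PySem.Dict Int Int) (hinv : PvInv K d) (s0 s1 : Int) :
    PvInv (K ++ [(s0, s1)]) (d.insert s0 (max (d.getD s0 s1) s1)) := by
  constructor
  · intro a m h
    rw [PySem.Dict.get?_insert] at h
    by_cases ha : a = s0
    · subst ha
      rw [if_pos rfl] at h
      rcases hold : d.get? a with _ | m0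
      · rw [PySem.Dict.getD_of_get?_eq_none _ _ hold] at h
        simp only [max_self, Option.some.injEq] at h
        subst h
        constructor
        · simp
        · intro b hb
          rcases List.mem_append.mp hb with hb | hb
          · obtain ⟨m', hm'⟩ := hinv.2 a b hb; rw [hm'] at hold; cases hold
          · simp at hb; omega
      · rw [PySem.Dict.getD_of_get?_eq_some _ _ hold] at h
        obtain ⟨hmem0, hmax0⟩ := hinv.1 a m0 hold
        cases h
        constructor
        · rcases le_total m0 s1 with hle | hle
          · rw [max_eq_right hle]; simp
          · rw [max_eq_left hle]; exact List.mem_append_left _ hmem0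
        · intro b hb
          rcases List.mem_append.mp hb with hb | hb
          · exact le_trans (hmax0 b hb) (le_max_left _ _)
          · simp at hb; omega
    · rw [if_neg ha] at h
      obtain ⟨hmem, hmax⟩ := hinv.1 a m h
      refine ⟨List.mem_append_left _ hmem, ?_⟩
      intro b hb
      rcases List.mem_append.mp hb with hb | hb
      · exact hmax b hb
      · simp at hb; omega
  · intro a b hb
    by_cases ha : a = s0
    · subst ha; exact ⟨_, PySem.Dict.get?_insert_self _ _ _⟩
    · rcases List.mem_append.mp hb with hb | hb
      · obtain ⟨m, hm⟩ := hinv.2 a b hb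
        exact ⟨m, by rw [PySem.Dict.get?_insert_of_ne _ _ ha]; exact hm⟩
      · simp at hb; omega

-- combined any-scan splits into the two single-side scans
lemma pv_any_split (K : List PvPhrase) (p : PvPhrase) :
    K.any (fun k =>
      decide (p.1.1 < k.1.2 ∧ p.1.2 > k.1.1) || decide (p.2.1.1 < k.2.1.2 ∧ p.2.1.2 > k.2.1.1))
    = ((K.map (·.1)).any (fun ab => decide (p.1.1 < ab.2 ∧ p.1.2 > ab.1)) ||
       (K.map (·.2.1)).any (fun ab => decide (p.2.1.1 < ab.2 ∧ p.2.1.2 > ab.1))) := by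
  apply Bool.coe_iff_coe.mp
  simp only [List.any_map, Function.comp_def, List.any_eq_true, Bool.or_eq_true,
    decide_eq_true_eq]
  constructor
  · rintro ⟨k, hk, h | h⟩
    · exact Or.inl ⟨k, hk, h⟩
    · exact Or.inr ⟨k, hk, h⟩
  · rintro (⟨k, hk, h⟩ | ⟨k, hk, h⟩)
    · exact ⟨k, hk, Or.inl h⟩
    · exact ⟨k, hk, Or.inr h⟩

-- the whole loop, by induction along the sorted list
lemma pv_loop_eq (l : List PvPhrase) :
    ∀ (K : List PvPhrase) (dS dT : PySem.Dict Int Int) ,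
    PvInv (K.map (·.1)) dS → PvInv (K.map (·.2.1)) dT →
    (∀ q ∈ K, q.1.2 - q.1.1 ≤ 3 ∧ q.2.1.2 - q.2.1.1 ≤ 3) →
    (l.foldl pvStepB (dS, dT, PySem.Set.ofList (K.filter pvCleanA))).2.2
      = PySem.Set.ofList ((l.foldl pvStepA K).filter pvCleanA) := by
  induction l with
  | nil => intro K dS dT _ _ _; rfl
  | cons p l ih =>
    intro K dS dT hS hT hlen
    simp only [List.foldl_cons]
    by_cases hbig : p.1.2 - p.1.1 > 3 ∨ p.2.1.2 - p.2.1.1 > 3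
    · rw [show pvStepB (dS, dT, PySem.Set.ofList (K.filter pvCleanA)) p
            = (dS, dT, PySem.Set.ofList (K.filter pvCleanA)) from by
          unfold pvStepB; rw [if_pos hbig]]
      rw [show pvStepA K p = K from by unfold pvStepA; rw [if_neg (by omega)]]
      exact ih K dS dT hS hT hlen
    · have hsmall : p.1.2 - p.1.1 ≤ 3 ∧ p.2.1.2 - p.2.1.1 ≤ 3 := by omega
      have hWS := pvWin_eq _ dS hS (fun ab hab => by
        obtain ⟨q, hq, rfl⟩ := List.mem_map.mp hab
        simpa using (hlen q hq).1) p.1.1 p.1.2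
      have hWT := pvWin_eq _ dT hT (fun ab hab => by
        obtain ⟨q, hq, rfl⟩ := List.mem_map.mp hab
        simpa using (hlen q hq).2) p.2.1.1 p.2.1.2
      by_cases hws : pvWin dS p.1.1 p.1.2 = true
      · -- source window hit: both sides skip p
        have hov : K.any (fun k =>
            decide (p.1.1 < k.1.2 ∧ p.1.2 > k.1.1) || decide (p.2.1.1 < k.2.1.2 ∧ p.2.1.2 > k.2.1.1)) = true := by
          rw [pv_any_split]; rw [hWS] at hws; rw [hws]; simp
        rw [show pvStepB (dS, dT, PySem.Set.ofList (K.filter pvCleanA)) p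
              = (dS, dT, PySem.Set.ofList (K.filter pvCleanA)) from by
            unfold pvStepB; rw [if_neg (by omega), if_pos hws]]
        rw [show pvStepA K p = K from by
            unfold pvStepA; rw [if_pos hsmall]; simp only [hov, if_true]]
        exact ih K dS dT hS hT hlen
      · by_cases hwt : pvWin dT p.2.1.1 p.2.1.2 = true
        · have hov : K.any (fun k =>
              decide (p.1.1 < k.1.2 ∧ p.1.2 > k.1.1) || decide (p.2.1.1 < k.2.1.2 ∧ p.2.1.2 > k.2.1.1)) = true := by
            rw [pv_any_split]; rw [hWT] at hwt; rw [hwt]; simp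
          rw [show pvStepB (dS, dT, PySem.Set.ofList (K.filter pvCleanA)) p
                = (dS, dT, PySem.Set.ofList (K.filter pvCleanA)) from by
              unfold pvStepB; rw [if_neg (by omega), if_neg hws, if_pos hwt]]
          rw [show pvStepA K p = K from by
              unfold pvStepA; rw [if_pos hsmall]; simp only [hov, if_true]]
          exact ih K dS dT hS hT hlen
        · -- no overlap: both sides keep p
          have hov : K.any (fun k =>
              decide (p.1.1 < k.1.2 ∧ p.1.2 > k.1.1) || decide (p.2.1.1 < k.2.1.2 ∧ p.2.1.2 > k.2.1.1)) = false := by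
            rw [pv_any_split]
            rw [hWS] at hws; rw [hWT] at hwt
            simp only [Bool.not_eq_true] at hws hwt
            rw [hws, hwt]; rfl
          rw [show pvStepA K p = K ++ [p] from by
              unfold pvStepA; rw [if_pos hsmall]; simp only [hov]; simp]
          rw [show pvStepB (dS, dT, PySem.Set.ofList (K.filter pvCleanA)) p
                = (dS.insert p.1.1 (max (dS.getD p.1.1 p.1.2) p.1.2),
                   dT.insert p.2.1.1 (max (dT.getD p.2.1.1 p.2.1.2) p.2.1.2),
                   PySem.Set.ofList ((K ++ [p]).filter pvCleanA)) from by
              unfold pvStepB; rw [if_neg (by omega), if_neg hws, if_neg hwt]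
              simp only [List.filter_append, List.filter_cons, List.filter_nil]
              rw [pv_isdisjoint_eq, pv_isdisjoint_eq]
              by_cases hc : pvCleanA p = true
              · rw [if_pos (show _ from by unfold pvCleanA at hc; exact hc), if_pos hc,
                    PySem.Set.ofList_append_singleton]
              · rw [if_neg (by unfold pvCleanA at hc; exact hc), if_neg hc]
                simp]
          have hS' : PvInv ((K ++ [p]).map (·.1)) (dS.insert p.1.1 (max (dS.getD p.1.1 p.1.2) p.1.2)) := by
            rw [List.map_append]; exact pvInv_step _ _ hS p.1.1 p.1.2
          have hT' : PvInv ((K ++ [p]).map (·.2.1)) (dT.insert p.2.1.1 (max (dT.getD p.2.1.1 p.2.1.2) p.2.1.2)) := by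
            rw [List.map_append]; exact pvInv_step _ _ hT p.2.1.1 p.2.1.2
          exact ih (K ++ [p]) _ _ hS' hT' (by
            intro q hq
            rcases List.mem_append.mp hq with hq | hq
            · exact hlen q hq
            · simp at hq; subst hq; exact hsmall)

-- ===== VERDICT (by name: the statement is the Claim_ definition above) =====
theorem trim_phrase_translation_table_py_spec : Claim_equal_trim_phrase_translation_table_py := by
  intro pt _
  unfold Spec_trim_phrase_translation_table_py
  unfold trim_phrase_translation_table_py trim_phrase_translation_table_py_alt
  have h := pv_loop_eq (PySem.List.sorted2 pt (fun p => p.1.2 - p.1.1) (fun p => p.2.1.2 - p.2.1.1))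
    [] PySem.Dict.empty PySem.Dict.empty
    (by simpa using pvInv_empty) (by simpa using pvInv_empty) (by simp)
  simp only [List.filter_nil] at h
  rw [show PySem.Set.ofList ([] : List PvPhrase) = PySem.Set.empty from rfl] at h
  rw [h, PySem.Set.ofList_ofList]
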